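-- pv_equiv track=rewrite | github.com/theabbie/leetcode | maximum-gcd-sum-of-a-subarray.py | maxGcdSum
-- ===== SOURCE A (Python) =====
-- from typing import List
--
-- def gcd(a, b):
--     while b:
--         a, b = b, a % b
--     return a
--
-- def maxGcdSum(nums: List[int], k: int) -> int:
--     res = 0
--     stack = []
--     for el in nums[::-1]:
--         ns = []
--         for g, gctr, s in [(el, 1, el)] + stack:
--             if ns and gcd(g, el) == ns[-1][0]:
--                 ns[-1][1] += gctr
--                 ns[-1][2] += s
--             else:
--                 ns.append([gcd(g, el), gctr, s])
--         pctr = 0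
--         ps = 0
--         for g, gctr, s in ns:
--             pctr += gctr
--             ps += s
--             if pctr >= k:
--                 res = max(res, g * ps)
--         stack = ns
--     return res
-- ===== SOURCE B (Python) =====
-- def gcd(a, b):
--     while b:
--         a, b = b, a % b
--     return a
--
-- def maxGcdSum(nums, k):
--     # plain row of (gcd(nums[i..j]), nums[j]) for the current start i; no bucket compression
--     res = 0
--     row = []
--     for el in reversed(nums):
--         row = [(el, el)] + [(gcd(g, el), v) for (g, v) in row]
--         t = 0
--         s = 0
--         for idx, (g, v) in enumerate(row):
--             t += 1
--             s += v
--             if t >= k and (idx + 1 == len(row) or row[idx + 1][0] != g):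
--                 res = max(res, g * s)
--     return res
-- ===== Notes on version B (the rewrite author's own statement) =====
-- stated objective: simpler
-- what changed: B drops A's run-length-compressed stack of (gcd,count,sum) buckets with its merge-on-append bookkeeping and instead keeps a plain row of (suffix-gcd, element) pairs per end index, scanning it once with a one-step lookahead to update the answer at gcd-run boundaries.
import Mathlib
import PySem

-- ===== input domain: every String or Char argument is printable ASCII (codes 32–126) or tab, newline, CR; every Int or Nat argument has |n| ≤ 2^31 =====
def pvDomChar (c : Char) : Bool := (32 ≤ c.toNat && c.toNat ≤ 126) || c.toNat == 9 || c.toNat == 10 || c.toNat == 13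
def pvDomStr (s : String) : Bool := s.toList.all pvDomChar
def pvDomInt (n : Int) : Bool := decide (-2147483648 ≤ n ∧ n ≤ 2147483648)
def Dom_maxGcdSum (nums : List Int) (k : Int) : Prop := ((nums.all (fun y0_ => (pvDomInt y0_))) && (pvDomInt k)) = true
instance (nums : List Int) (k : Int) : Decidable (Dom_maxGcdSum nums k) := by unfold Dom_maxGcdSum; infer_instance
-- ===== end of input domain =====

-- B replaces A's run-length-compressed stack of (gcd,count,sum) buckets by a plain
-- uncompressed row of (gcd, element) pairs scanned with a lookahead (objective: simpler).

-- Python's `while b: a, b = b, a % b; return a` (flooring %), shared helper of both sources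
theorem pymod_natAbs_lt (a b : Int) (hb : b ≠ 0) : (PySem.Int.mod a b).natAbs < b.natAbs := by
  rcases lt_or_gt_of_ne hb with h | h
  · have h1 := (PySem.Int.mod_neg_bounds (a := a) h).1
    have h2 := (PySem.Int.mod_neg_bounds (a := a) h).2
    omega
  · have h1 := PySem.Int.mod_nonneg (a := a) h
    have h2 := PySem.Int.mod_lt (a := a) h
    omega

def pygcd (a b : Int) : Int :=
  if hb : b = 0 then a else pygcd b (PySem.Int.mod a b)
termination_by b.natAbs
decreasing_by exact pymod_natAbs_lt a b hb

-- ===== PORT A =====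

-- `if ns and gcd(g,el)==ns[-1][0]: ns[-1][1]+=gctr; ns[-1][2]+=s else: ns.append(...)`
def pushA (el : Int) (ns : List (Int × Int × Int)) (e : Int × Int × Int) : List (Int × Int × Int) :=
  match ns.getLast? with
  | some le =>
      if pygcd e.1 el = le.1
      then ns.dropLast ++ [(le.1, le.2.1 + e.2.1, le.2.2 + e.2.2)]
      else ns ++ [(pygcd e.1 el, e.2.1, e.2.2)]
  | none => [(pygcd e.1 el, e.2.1, e.2.2)]

-- `pctr += gctr; ps += s; if pctr >= k: res = max(res, g*ps)`
def loopStep2 (k : Int) (st : Int × Int × Int) (e : Int × Int × Int) : Int × Int × Int :=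
  let pctr := st.1 + e.2.1
  let ps := st.2.1 + e.2.2
  (pctr, ps, if pctr ≥ k then max st.2.2 (e.1 * ps) else st.2.2)

-- one iteration of `for el in nums[::-1]` (state: res, stack)
def stepA (k : Int) (st : Int × List (Int × Int × Int)) (el : Int) : Int × List (Int × Int × Int) :=
  let ns := ((el, 1, el) :: st.2).foldl (pushA el) []
  ((ns.foldl (loopStep2 k) (0, 0, st.1)).2.2, ns)

def maxGcdSum (nums : List Int) (k : Int) : Int :=
  (nums.reverse.foldl (stepA k) (0, [])).1

-- ===== PORT B =====

-- scan the row; update res at run ends (`idx+1 == len(row) or row[idx+1][0] != g`)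
def scanB (k : Int) : List (Int × Int) → Int → Int → Int → Int
  | [], _, _, res => res
  | (g, v) :: rest, t, s, res =>
      let t' := t + 1
      let s' := s + v
      let res' := if decide (t' ≥ k) && (match rest with | [] => true | (g2, _) :: _ => g2 != g)
        then max res (g * s') else res
      scanB k rest t' s' res'

-- one iteration of `for el in reversed(nums)` (state: res, row)
def stepB (k : Int) (st : Int × List (Int × Int)) (el : Int) : Int × List (Int × Int) :=
  let row := (el, el) :: st.2.map (fun p => (pygcd p.1 el, p.2))
  (scanB k row 0 0 st.1, row)

def maxGcdSum_alt (nums : List Int) (k : Int) : Int :=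
  (nums.reverse.foldl (stepB k) (0, [])).1

-- ===== PRECONDITION & SPEC =====
def Spec_maxGcdSum (nums : List Int) (k : Int) (out : Int) : Prop := out = maxGcdSum_alt nums k
instance (nums : List Int) (k : Int) (out : Int) : Decidable (Spec_maxGcdSum nums k out) := by unfold Spec_maxGcdSum; infer_instance

-- ===== CLAIM (what is proved, stated in full; the proofs are below) =====
def Claim_equal_maxGcdSum : Prop := ∀ (nums : List Int) (k : Int), Dom_maxGcdSum nums k → Spec_maxGcdSum nums k (maxGcdSum nums k)

-- ===== LEMMAS AND PROOFS =====

-- merge a bucket onto the FRONT of a merged bucket list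
def consM (e : Int × Int × Int) (m : List (Int × Int × Int)) : List (Int × Int × Int) :=
  match m with
  | [] => [e]
  | e2 :: tl => if e2.1 = e.1 then (e.1, e.2.1 + e2.2.1, e.2.2 + e2.2.2) :: tl else e :: e2 :: tl

def mergeT : List (Int × Int × Int) → List (Int × Int × Int)
  | [] => []
  | e :: tl => consM e (mergeT tl)

def mapT (el : Int) (m : List (Int × Int × Int)) : List (Int × Int × Int) :=
  m.map (fun e => (pygcd e.1 el, e.2.1, e.2.2))

def rleRow (row : List (Int × Int)) : List (Int × Int × Int) :=
  mergeT (row.map (fun p => (p.1, 1, p.2)))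

-- merge a second merged list onto the END of a list
def mergeEndR : List (Int × Int × Int) → List (Int × Int × Int) → List (Int × Int × Int)
  | [], m => m
  | [x], m => consM x m
  | x :: y :: tl, m => x :: mergeEndR (y :: tl) m

theorem pygcd_zero (a : Int) : pygcd a 0 = a := by
  rw [pygcd]; simp

theorem pygcd_self (a : Int) : pygcd a a = a := by
  rw [pygcd]
  by_cases h : a = 0
  · simp [h]
  · have hm : PySem.Int.mod a a = 0 := (PySem.Int.mod_eq_zero_iff_dvd a a).2 dvd_rfl
    rw [dif_neg h, hm, pygcd_zero]

theorem consM_head (e : Int × Int × Int) (m : List (Int × Int × Int)) :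
    ∃ c s tl, consM e m = (e.1, c, s) :: tl := by
  cases m with
  | nil => exact ⟨e.2.1, e.2.2, [], rfl⟩
  | cons e2 tl =>
      by_cases h : e2.1 = e.1
      · exact ⟨e.2.1 + e2.2.1, e.2.2 + e2.2.2, tl, by simp [consM, h]⟩
      · exact ⟨e.2.1, e.2.2, e2 :: tl, by simp [consM, h]⟩

theorem consM_consM (e1 e2 : Int × Int × Int) (m : List (Int × Int × Int)) (h : e2.1 = e1.1) :
    consM e1 (consM e2 m) = consM (e1.1, e1.2.1 + e2.2.1, e1.2.2 + e2.2.2) m := by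
  cases m with
  | nil => simp [consM, h]
  | cons e3 tl =>
      by_cases h3 : e3.1 = e2.1
      · simp only [consM, if_pos h3]
        rw [h] at h3
        simp [h3, h]
        constructor <;> ring
      · have h3' : e3.1 ≠ e1.1 := by rw [← h]; exact h3
        simp [consM, h3, h3', h]

theorem mergeT_mapT_consM (el : Int) (e : Int × Int × Int) (m : List (Int × Int × Int)) :
    mergeT (mapT el (consM e m)) = consM (pygcd e.1 el, e.2.1, e.2.2) (mergeT (mapT el m)) := by
  cases m with
  | nil => simp [consM, mapT, mergeT]
  | cons e2 tl =>
      by_cases h : e2.1 = e.1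
      · rw [show consM e (e2 :: tl) = (e.1, e.2.1 + e2.2.1, e.2.2 + e2.2.2) :: tl by
            simp [consM, h]]
        rw [show mergeT (mapT el ((e.1, e.2.1 + e2.2.1, e.2.2 + e2.2.2) :: tl))
              = consM (pygcd e.1 el, e.2.1 + e2.2.1, e.2.2 + e2.2.2) (mergeT (mapT el tl))
            from rfl]
        rw [show mergeT (mapT el (e2 :: tl))
              = consM (pygcd e2.1 el, e2.2.1, e2.2.2) (mergeT (mapT el tl)) from rfl]
        rw [consM_consM _ _ _ (by simp [h])]
      · rw [show consM e (e2 :: tl) = e :: e2 :: tl by simp [consM, h]]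
        rfl

theorem mergeT_mapT_mergeT (el : Int) (ys : List (Int × Int × Int)) :
    mergeT (mapT el (mergeT ys)) = mergeT (mapT el ys) := by
  induction ys with
  | nil => rfl
  | cons y ys ih =>
      show mergeT (mapT el (consM y (mergeT ys))) = _
      rw [mergeT_mapT_consM]
      rw [ih]
      rfl

theorem pushA_cons_cons (el : Int) (x y : Int × Int × Int) (tl : List (Int × Int × Int))
    (e : Int × Int × Int) : pushA el (x :: y :: tl) e = x :: pushA el (y :: tl) e := by
  simp only [pushA, List.getLast?_cons_cons]
  cases h : (y :: tl).getLast? with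
  | none => simp at h
  | some le => by_cases hg : pygcd e.1 el = le.1 <;> simp [hg, List.dropLast]

theorem pushA_eq (el : Int) (ns : List (Int × Int × Int)) (e : Int × Int × Int) :
    pushA el ns e = mergeEndR ns [(pygcd e.1 el, e.2.1, e.2.2)] := by
  induction ns with
  | nil => rfl
  | cons x tl ih =>
      cases tl with
      | nil =>
          show pushA el [x] e = consM x [(pygcd e.1 el, e.2.1, e.2.2)]
          by_cases hg : pygcd e.1 el = x.1
          · simp [pushA, consM, hg]
          · simp [pushA, consM, hg]
      | cons y tl2 =>
          rw [pushA_cons_cons, ih]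
          rfl

theorem mergeEndR_ne_nil (ns m : List (Int × Int × Int)) (hm : m ≠ []) :
    mergeEndR ns m ≠ [] := by
  induction ns with
  | nil => simpa [mergeEndR]
  | cons x tl ih =>
      cases tl with
      | nil =>
          obtain ⟨c, s, tl', h⟩ := consM_head x m
          simp [mergeEndR, h]
      | cons y tl2 => simp [mergeEndR]

theorem mergeEndR_nil (ns : List (Int × Int × Int)) : mergeEndR ns [] = ns := by
  induction ns with
  | nil => rfl
  | cons x tl ih =>
      cases tl with
      | nil => rfl
      | cons y tl2 => simpa [mergeEndR] using ih

theorem mergeEndR_cons_of_ne_nil (x : Int × Int × Int) (l m : List (Int × Int × Int))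
    (hl : l ≠ []) : mergeEndR (x :: l) m = x :: mergeEndR l m := by
  cases l with
  | nil => exact absurd rfl hl
  | cons y tl => rfl

theorem mergeEndR_mergeEndR (ns : List (Int × Int × Int)) (x : Int × Int × Int)
    (m : List (Int × Int × Int)) :
    mergeEndR (mergeEndR ns [x]) m = mergeEndR ns (consM x m) := by
  induction ns with
  | nil => rfl
  | cons a tl ih =>
      cases tl with
      | nil =>
          show mergeEndR (consM a [x]) m = consM a (consM x m)
          by_cases h : x.1 = a.1
          · have : consM a [x] = [(a.1, a.2.1 + x.2.1, a.2.2 + x.2.2)] := by simp [consM, h]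
            rw [this]
            show consM (a.1, a.2.1 + x.2.1, a.2.2 + x.2.2) m = _
            rw [consM_consM a x m h]
          · have h1 : consM a [x] = [a, x] := by simp [consM, h]
            rw [h1]
            show a :: consM x m = consM a (consM x m)
            obtain ⟨c, s, tl', hcm⟩ := consM_head x m
            rw [hcm]
            simp [consM, h]
      | cons b tl2 =>
          have h1 : mergeEndR (a :: b :: tl2) [x] = a :: mergeEndR (b :: tl2) [x] := rfl
          rw [h1, mergeEndR_cons_of_ne_nil a _ m (mergeEndR_ne_nil _ _ (by simp)),
            ih]
          rfl

theorem foldl_pushA (el : Int) (ts : List (Int × Int × Int)) :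
    ∀ ns, ts.foldl (pushA el) ns = mergeEndR ns (mergeT (mapT el ts)) := by
  induction ts with
  | nil => intro ns; simp [mergeT, mapT, mergeEndR_nil]
  | cons t ts ih =>
      intro ns
      rw [List.foldl_cons, ih, pushA_eq]
      show _ = mergeEndR ns (mergeT ((pygcd t.1 el, t.2.1, t.2.2) :: mapT el ts))
      rw [show mergeT ((pygcd t.1 el, t.2.1, t.2.2) :: mapT el ts)
            = consM (pygcd t.1 el, t.2.1, t.2.2) (mergeT (mapT el ts)) from rfl,
        mergeEndR_mergeEndR]

-- the stack A builds in one outer iteration is the run-length encoding of B's row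
theorem stack_step (el : Int) (row : List (Int × Int)) :
    ((el, 1, el) :: rleRow row).foldl (pushA el) []
      = rleRow ((el, el) :: row.map (fun p => (pygcd p.1 el, p.2))) := by
  rw [foldl_pushA]
  show mergeEndR [] (mergeT (mapT el ((el, 1, el) :: rleRow row))) = _
  have h1 : mergeT (mapT el ((el, 1, el) :: rleRow row))
      = consM (pygcd el el, 1, el) (mergeT (mapT el (rleRow row))) := rfl
  rw [show mergeEndR [] (mergeT (mapT el ((el, 1, el) :: rleRow row)))
        = mergeT (mapT el ((el, 1, el) :: rleRow row)) from rfl, h1, pygcd_self]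
  unfold rleRow
  rw [mergeT_mapT_mergeT]
  have h2 : mapT el (row.map (fun p => (p.1, 1, p.2)))
      = (row.map (fun p => (pygcd p.1 el, p.2))).map (fun p => (p.1, 1, p.2)) := by
    simp [mapT, List.map_map]
  rw [List.map_cons, show mergeT (((el, el).1, 1, (el, el).2)
        :: (row.map (fun p => (pygcd p.1 el, p.2))).map (fun p => (p.1, 1, p.2)))
      = consM (el, 1, el) (mergeT ((row.map (fun p => (pygcd p.1 el, p.2))).map
          (fun p => (p.1, 1, p.2)))) from rfl, h2]

theorem rleRow_cons (g v : Int) (rest : List (Int × Int)) :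
    rleRow ((g, v) :: rest) = consM (g, 1, v) (rleRow rest) := rfl

-- B's lookahead scan over the row computes A's second loop over the encoded stack
theorem scanB_eq (k : Int) (row : List (Int × Int)) :
    ∀ t s res, scanB k row t s res = ((rleRow row).foldl (loopStep2 k) (t, s, res)).2.2 := by
  induction row with
  | nil => intro t s res; rfl
  | cons p rest ih =>
      obtain ⟨g, v⟩ := p
      intro t s res
      cases rest with
      | nil =>
          show (if decide (t + 1 ≥ k) && true then max res (g * (s + v)) else res)
              = ((consM (g, 1, v) []).foldl (loopStep2 k) (t, s, res)).2.2
          simp only [consM, List.foldl_cons, List.foldl_nil, loopStep2, Bool.and_true]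
          by_cases h : t + 1 ≥ k <;> simp [h]
      | cons q rest2 =>
          obtain ⟨g2, v2⟩ := q
          by_cases hg : g2 = g
          · -- run continues: B does not update; the merged bucket absorbs this entry
            obtain ⟨c, sv, tl, hr⟩ := consM_head (g2, 1, v2) (rleRow rest2)
            have hrest : rleRow ((g2, v2) :: rest2) = (g2, c, sv) :: tl := by
              rw [rleRow_cons]; exact hr
            have hrow : rleRow ((g, v) :: (g2, v2) :: rest2)
                = (g, 1 + c, v + sv) :: tl := by
              rw [rleRow_cons, hrest]
              simp [consM, hg]
            have hb : scanB k ((g, v) :: (g2, v2) :: rest2) t s res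
                = scanB k ((g2, v2) :: rest2) (t + 1) (s + v) res := by
              show scanB k _ _ _ (if decide (t + 1 ≥ k) && ((g2 : Int) != g) then _ else res) = _
              simp [hg]
            rw [hb, ih, hrest, hrow]
            simp only [List.foldl_cons, loopStep2]
            have hst : ((t + 1 + c : Int), ((s + v + sv : Int),
                  if t + 1 + c ≥ k then max res (g2 * (s + v + sv)) else res))
                = ((t + (1 + c) : Int), ((s + (v + sv) : Int),
                  if t + (1 + c) ≥ k then max res (g * (s + (v + sv))) else res)) := by
              have e1 : (t + 1 + c : Int) = t + (1 + c) := by ring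
              have e2 : (s + v + sv : Int) = s + (v + sv) := by ring
              rw [hg, e1, e2]
            rw [hst]
          · -- run ends here: B updates; the bucket is closed
            obtain ⟨c, sv, tl, hr⟩ := consM_head (g2, 1, v2) (rleRow rest2)
            have hrest : rleRow ((g2, v2) :: rest2) = (g2, c, sv) :: tl := by
              rw [rleRow_cons]; exact hr
            have hrow : rleRow ((g, v) :: (g2, v2) :: rest2)
                = (g, 1, v) :: rleRow ((g2, v2) :: rest2) := by
              rw [rleRow_cons (g := g), hrest]
              simp [consM, hg]
            have hb : scanB k ((g, v) :: (g2, v2) :: rest2) t s res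
                = scanB k ((g2, v2) :: rest2) (t + 1) (s + v)
                  (if t + 1 ≥ k then max res (g * (s + v)) else res) := by
              show scanB k _ _ _ (if decide (t + 1 ≥ k) && ((g2 : Int) != g) then _ else res) = _
              simp [hg]
            rw [hb, ih, hrow]
            simp [List.foldl_cons, loopStep2]

-- the outer fold preserves the coupling (equal res, stack = rle row)
theorem outer_fold (k : Int) (l : List Int) :
    ∀ res (row : List (Int × Int)),
      l.foldl (stepA k) (res, rleRow row) =
        ((l.foldl (stepB k) (res, row)).1, rleRow (l.foldl (stepB k) (res, row)).2) := by
  induction l with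
  | nil => intro res row; rfl
  | cons el l ih =>
      intro res row
      have hstack : (stepA k (res, rleRow row) el).2
          = rleRow ((stepB k (res, row) el).2) := by
        show ((el, 1, el) :: rleRow row).foldl (pushA el) [] = _
        rw [stack_step]
        rfl
      have hres : (stepA k (res, rleRow row) el).1 = (stepB k (res, row) el).1 := by
        show (((((el, 1, el) :: rleRow row).foldl (pushA el) []).foldl
            (loopStep2 k) (0, 0, res)).2.2) = scanB k ((el, el) :: row.map (fun p => (pygcd p.1 el, p.2))) 0 0 res
        rw [stack_step, scanB_eq]
      have hA : stepA k (res, rleRow row) el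
          = ((stepB k (res, row) el).1, rleRow ((stepB k (res, row) el).2)) := by
        rw [← hres, ← hstack]
      simp only [List.foldl_cons]
      rw [hA, ih]

-- ===== VERDICT (by name: the statement is the Claim_ definition above) =====
theorem maxGcdSum_spec : Claim_equal_maxGcdSum := by
  intro nums k _
  show maxGcdSum nums k = maxGcdSum_alt nums k
  unfold maxGcdSum maxGcdSum_alt
  have h := outer_fold k nums.reverse 0 []
  rw [show rleRow [] = [] from rfl] at h
  rw [h]
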